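-- pv_equiv track=rewrite | github.com/NoeticDiffusion/NeuralManifoldDynamics | mndm/src/mndm/features/epoch_selection.py | build_epoch_meta
-- ===== SOURCE A (Python) =====
-- from typing import Any, Dict, List, Mapping, Optional, Sequence
--
-- def build_epoch_meta(n_samples: int, epoch_length_samples: int, epoch_step_samples: int) -> List[tuple[int, int, int]]:
--     """Build (epoch_id, start_idx, end_idx) tuples for valid epochs."""
--     if epoch_length_samples <= 0 or epoch_step_samples <= 0 or n_samples < epoch_length_samples:
--         return []
--     n_epochs = (n_samples - epoch_length_samples) // epoch_step_samples + 1
--     out: List[tuple[int, int, int]] = []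
--     for epoch_idx in range(max(n_epochs, 0)):
--         start_idx = epoch_idx * epoch_step_samples
--         end_idx = start_idx + epoch_length_samples
--         if end_idx > n_samples:
--             break
--         out.append((epoch_idx, start_idx, end_idx))
--     return out
-- ===== SOURCE B (Python) =====
-- from typing import List
--
-- def build_epoch_meta(n_samples: int, epoch_length_samples: int, epoch_step_samples: int) -> List[tuple[int, int, int]]:
--     """Build (epoch_id, start_idx, end_idx) tuples for valid epochs."""
--     if epoch_length_samples <= 0 or epoch_step_samples <= 0:
--         return []
--     # stage 1: count the windows by repeated subtraction (no floor division)
--     k = 0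
--     m = n_samples
--     while m >= epoch_length_samples:
--         k += 1
--         m -= epoch_step_samples
--     # stage 2: materialize the tuples directly, no fit check needed
--     return [(i, i * epoch_step_samples, i * epoch_step_samples + epoch_length_samples)
--             for i in range(k)]
-- ===== Notes on version B (the rewrite author's own statement) =====
-- stated objective: alternative
-- what changed: B is a two-stage decomposition: stage 1 counts the windows by repeated subtraction of the step (no floor-division closed form), stage 2 materializes the tuples from that count with no per-window fit check and no break; A computes the count by floor division and emits inside a break-guarded loop.
import Mathlib
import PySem

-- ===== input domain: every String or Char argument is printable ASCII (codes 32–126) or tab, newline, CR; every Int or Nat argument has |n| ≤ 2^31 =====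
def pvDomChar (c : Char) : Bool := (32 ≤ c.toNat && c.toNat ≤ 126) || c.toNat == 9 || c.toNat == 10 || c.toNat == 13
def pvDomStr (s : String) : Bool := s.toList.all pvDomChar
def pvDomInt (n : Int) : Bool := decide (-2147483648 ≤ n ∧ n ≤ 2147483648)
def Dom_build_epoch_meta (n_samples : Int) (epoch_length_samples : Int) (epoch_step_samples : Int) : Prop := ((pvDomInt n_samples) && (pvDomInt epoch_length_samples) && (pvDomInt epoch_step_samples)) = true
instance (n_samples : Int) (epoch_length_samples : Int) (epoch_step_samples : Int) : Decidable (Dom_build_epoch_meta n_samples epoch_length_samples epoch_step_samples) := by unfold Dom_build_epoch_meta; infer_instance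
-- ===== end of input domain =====

-- B is a two-stage decomposition: count the fitting windows by repeated subtraction of the
-- step, then materialize the tuples from that count (no floor division, no break, no per-window
-- fit check); objective: alternative.

-- ===== PORT A =====
-- A's 'for … break' loop, transliterated: break returns the accumulator as-is
def buildA_loop (n len step : Int) (idxs : List Int) (acc : List (Int × Int × Int)) : List (Int × Int × Int) :=
  match idxs with
  | [] => acc
  | i :: rest =>
    let start_idx := i * step
    let end_idx := start_idx + len
    if end_idx > n then acc
    else buildA_loop n len step rest (acc ++ [(i, start_idx, end_idx)])

def build_epoch_meta (n_samples : Int) (epoch_length_samples : Int) (epoch_step_samples : Int) : List (Int × Int × Int) :=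
  if epoch_length_samples ≤ 0 ∨ epoch_step_samples ≤ 0 ∨ n_samples < epoch_length_samples then []
  else
    let n_epochs := PySem.Int.floordiv (n_samples - epoch_length_samples) epoch_step_samples + 1
    buildA_loop n_samples epoch_length_samples epoch_step_samples
      (PySem.List.pyRange 0 (max n_epochs 0) 1) []

-- ===== PORT B =====
-- B's stage-1 counting loop; the extra '0 < step' in the guard only makes the
-- recursion total (it holds at the single call site, by B's top-level guard)
def buildB_count (len step m : Int) : Int :=
  if h : len ≤ m ∧ 0 < step then buildB_count len step (m - step) + 1 else 0
termination_by (m - len + 1).toNat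
decreasing_by omega

def build_epoch_meta_alt (n_samples : Int) (epoch_length_samples : Int) (epoch_step_samples : Int) : List (Int × Int × Int) :=
  if epoch_length_samples ≤ 0 ∨ epoch_step_samples ≤ 0 then []
  else
    (PySem.List.pyRange 0 (buildB_count epoch_length_samples epoch_step_samples n_samples) 1).map
      (fun i => (i, i * epoch_step_samples, i * epoch_step_samples + epoch_length_samples))

-- ===== PRECONDITION & SPEC =====
def Spec_build_epoch_meta (n_samples : Int) (epoch_length_samples : Int) (epoch_step_samples : Int) (out : List (Int × Int × Int)) : Prop := out = build_epoch_meta_alt n_samples epoch_length_samples epoch_step_samples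
instance (n_samples : Int) (epoch_length_samples : Int) (epoch_step_samples : Int) (out : List (Int × Int × Int)) : Decidable (Spec_build_epoch_meta n_samples epoch_length_samples epoch_step_samples out) := by unfold Spec_build_epoch_meta; infer_instance

-- ===== CLAIM (what is proved, stated in full; the proofs are below) =====
def Claim_equal_build_epoch_meta : Prop := ∀ (n_samples : Int) (epoch_length_samples : Int) (epoch_step_samples : Int), Dom_build_epoch_meta n_samples epoch_length_samples epoch_step_samples → Spec_build_epoch_meta n_samples epoch_length_samples epoch_step_samples (build_epoch_meta n_samples epoch_length_samples epoch_step_samples)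

-- ===== LEMMAS AND PROOFS =====

-- A's loop never breaks when every listed window fits: it is a plain map.
lemma loopA_nobreak (n len step : Int) :
    ∀ (l : List Int) (acc : List (Int × Int × Int)),
      (∀ i ∈ l, i * step + len ≤ n) →
      buildA_loop n len step l acc
        = acc ++ l.map (fun i => (i, i * step, i * step + len)) := by
  intro l
  induction l with
  | nil => intro acc _; simp [buildA_loop]
  | cons x rest ih =>
    intro acc hall
    have hx : x * step + len ≤ n := hall x (by simp)
    simp only [buildA_loop]
    rw [if_neg (by omega), ih _ (by intro i hi; exact hall i (by simp [hi]))]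
    simp

-- B's subtraction count equals A's closed-form count.
lemma buildB_count_eq (len step : Int) (hstep : 0 < step) :
    ∀ m : Int, buildB_count len step m
      = if len ≤ m then PySem.Int.floordiv (m - len) step + 1 else 0 := by
  suffices h : ∀ (k : Nat) (m : Int), (m - len + 1).toNat = k →
      buildB_count len step m
        = if len ≤ m then PySem.Int.floordiv (m - len) step + 1 else 0 by
    intro m; exact h _ m rfl
  intro k
  induction k using Nat.strong_induction_on with
  | _ k ih =>
    intro m hk
    by_cases hm : len ≤ m
    · rw [buildB_count, dif_pos ⟨hm, hstep⟩,
        ih (m - step - len + 1).toNat (by omega) (m - step) rfl, if_pos hm]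
      by_cases hm2 : len ≤ m - step
      · rw [if_pos hm2]
        have : PySem.Int.floordiv (m - len) step = PySem.Int.floordiv (m - step - len) step + 1 := by
          rw [PySem.Int.floordiv_eq_iff_of_pos hstep]
          have h1 : PySem.Int.floordiv (m - step - len) step * step ≤ m - step - len :=
            (PySem.Int.le_floordiv_iff_mul_le hstep).mp le_rfl
          have h2 : m - step - len < (PySem.Int.floordiv (m - step - len) step + 1) * step :=
            (PySem.Int.floordiv_lt_iff_lt_mul hstep).mp (by omega)
          constructor <;> nlinarith
        omega
      · rw [if_neg hm2]
        have : PySem.Int.floordiv (m - len) step = 0 := by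
          rw [PySem.Int.floordiv_eq_iff_of_pos hstep]
          constructor <;> nlinarith
        omega
    · rw [buildB_count, dif_neg (by tauto), if_neg hm]

theorem build_epoch_meta_spec : Claim_equal_build_epoch_meta := by
  intro n len step _
  unfold Spec_build_epoch_meta build_epoch_meta build_epoch_meta_alt
  by_cases hdeg : len ≤ 0 ∨ step ≤ 0
  · rw [if_pos (by tauto), if_pos hdeg]
  · have hstep : 0 < step := by omega
    rw [if_neg hdeg]
    by_cases hsmall : n < len
    · rw [if_pos (by tauto), buildB_count_eq len step hstep, if_neg (by omega)]
      simp [PySem.List.pyRange_one_eq_nil]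
    · rw [if_neg (by tauto), buildB_count_eq len step hstep, if_pos (by omega)]
      set q := PySem.Int.floordiv (n - len) step with hq
      have hq0 : 0 ≤ q := by
        rw [hq, PySem.Int.le_floordiv_iff_mul_le hstep]; omega
      show buildA_loop n len step (PySem.List.pyRange 0 (max (q + 1) 0) 1) [] = _
      rw [show max (q + 1) 0 = q + 1 from by omega]
      rw [loopA_nobreak n len step _ []
        (by
          intro i hi
          rw [PySem.List.mem_pyRange_one] at hi
          have hle : i ≤ q := by omega
          have h1 : q * step ≤ n - len := (PySem.Int.le_floordiv_iff_mul_le hstep).mp le_rfl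
          nlinarith)]
      simp
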